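-- pv_equiv track=rewrite | github.com/babyopen/5Dyc | scripts/predict_next.py | _calc_max_missing
-- ===== SOURCE A (Python) =====
-- def _calc_max_missing(seq, target):
--     max_gap = cur = 0
--     for v in seq:
--         if v == target:
--             max_gap = max(max_gap, cur)
--             cur = 0
--         else:
--             cur += 1
--     return max(max_gap, cur)
-- ===== SOURCE B (Python) =====
-- from itertools import groupby
--
-- def _calc_max_missing(seq, target):
--     return max((sum(1 for _ in grp)
--                 for is_t, grp in groupby(seq, key=lambda v: v == target)
--                 if not is_t),
--                default=0)
-- ===== Notes on version B (the rewrite author's own statement) =====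
-- stated objective: idiomatic
-- what changed: Replaces the running-counter-with-branch loop by itertools.groupby partitioning the sequence into runs and taking the max length of the non-target runs (default 0).
import Mathlib
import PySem

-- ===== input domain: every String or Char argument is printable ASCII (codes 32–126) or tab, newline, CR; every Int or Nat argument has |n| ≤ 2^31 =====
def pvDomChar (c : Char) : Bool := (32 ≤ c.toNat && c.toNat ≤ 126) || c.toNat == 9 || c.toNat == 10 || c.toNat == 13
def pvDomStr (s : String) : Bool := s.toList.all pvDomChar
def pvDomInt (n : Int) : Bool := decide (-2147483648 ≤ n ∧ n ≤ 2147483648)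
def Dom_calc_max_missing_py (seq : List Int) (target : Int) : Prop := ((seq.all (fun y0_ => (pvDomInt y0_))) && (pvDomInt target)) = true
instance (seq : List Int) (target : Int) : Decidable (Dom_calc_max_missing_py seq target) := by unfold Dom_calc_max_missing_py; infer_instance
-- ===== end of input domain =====

-- B replaces A's running-counter loop by a groupby-style decomposition into runs (idiomatic; same O(n) cost).


-- ===== PORT A =====
-- the for-loop over seq with state (max_gap, cur)
def calcLoopA : List Int → Int → Int × Int → Int × Int
  | [], _, s => s
  | v :: vs, target, (max_gap, cur) =>
    if v = target then calcLoopA vs target (max max_gap cur, 0)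
    else calcLoopA vs target (max_gap, cur + 1)

def calc_max_missing_py (seq : List Int) (target : Int) : Int :=
  let s := calcLoopA seq target (0, 0)
  max s.1 s.2

-- ===== PORT B =====
-- hand-ported groupby fused with the max over non-target runs: skip target
-- elements; at a non-target element, measure its whole run (takeWhile) and
-- continue after it (dropWhile).
def calc_max_missing_py_alt (seq : List Int) (target : Int) : Int :=
  match seq with
  | [] => 0
  | x :: xs =>
    if x = target then calc_max_missing_py_alt xs target
    else
      max (((x :: xs).takeWhile (· ≠ target)).length : Int)
          (calc_max_missing_py_alt ((x :: xs).dropWhile (· ≠ target)) target)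
termination_by seq.length
decreasing_by
  · simp
  · simp [*]
    exact List.length_dropWhile_le _ _

-- ===== PRECONDITION & SPEC =====
def Spec_calc_max_missing_py (seq : List Int) (target : Int) (out : Int) : Prop := out = calc_max_missing_py_alt seq target
instance (seq : List Int) (target : Int) (out : Int) : Decidable (Spec_calc_max_missing_py seq target out) := by unfold Spec_calc_max_missing_py; infer_instance

-- ===== CLAIM (what is proved, stated in full; the proofs are below) =====
def Claim_equal_calc_max_missing_py : Prop := ∀ (seq : List Int) (target : Int), Dom_calc_max_missing_py seq target → Spec_calc_max_missing_py seq target (calc_max_missing_py seq target)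

-- ===== LEMMAS AND PROOFS =====

def maxPair (s : Int × Int) : Int := max s.1 s.2

theorem alt_nonneg (seq : List Int) (target : Int) :
    0 ≤ calc_max_missing_py_alt seq target := by
  induction seq with
  | nil => simp [calc_max_missing_py_alt]
  | cons x xs ih =>
    rw [calc_max_missing_py_alt]
    split
    · exact ih
    · exact le_max_of_le_left (Int.natCast_nonneg _)

-- unfolding of B through one leading run, valid whatever the head is
theorem alt_run (seq : List Int) (target : Int) :
    calc_max_missing_py_alt seq target =
      max ((seq.takeWhile (· ≠ target)).length : Int)
          (calc_max_missing_py_alt (seq.dropWhile (· ≠ target)) target) := by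
  match seq with
  | [] => simp [calc_max_missing_py_alt]
  | x :: xs =>
    by_cases h : x = target
    · subst h
      simp
      exact alt_nonneg _ _
    · rw [calc_max_missing_py_alt, if_neg h]

-- max_gap factors out of the loop result
theorem loopA_max (seq : List Int) (target mg cur : Int) (hc : 0 ≤ cur) :
    maxPair (calcLoopA seq target (mg, cur)) =
      max mg (maxPair (calcLoopA seq target (0, cur))) := by
  induction seq generalizing mg cur with
  | nil =>
    simp only [calcLoopA, maxPair]
    rw [max_eq_right hc]
  | cons v vs ih =>
    by_cases h : v = target
    · simp only [calcLoopA, if_pos h]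
      rw [ih (max mg cur) 0 le_rfl, ih (max 0 cur) 0 le_rfl, max_eq_right hc, max_assoc]
    · simp only [calcLoopA, if_neg h]
      exact ih mg (cur + 1) (by omega)

-- the loop from (0, cur) extends the current run through the leading
-- non-target prefix, then behaves like B on the rest
theorem loopA_alt (seq : List Int) (target cur : Int) (hc : 0 ≤ cur) :
    maxPair (calcLoopA seq target (0, cur)) =
      max (cur + ((seq.takeWhile (· ≠ target)).length : Int))
          (calc_max_missing_py_alt (seq.dropWhile (· ≠ target)) target) := by
  induction seq generalizing cur with
  | nil =>
    simp only [calcLoopA, maxPair, List.takeWhile_nil, List.dropWhile_nil,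
      calc_max_missing_py_alt, List.length_nil, Int.natCast_zero, add_zero]
    rw [max_eq_right hc, max_eq_left hc]
  | cons v vs ih =>
    by_cases h : v = target
    · subst h
      simp only [calcLoopA, List.takeWhile_cons, List.dropWhile_cons, ne_eq,
        not_true_eq_false, decide_false, Bool.false_eq_true, if_false, if_true,
        List.length_nil, Int.natCast_zero, add_zero]
      simp only [ne_eq] at ih
      rw [loopA_max vs v (max 0 cur) 0 le_rfl, ih 0 le_rfl, zero_add]
      have h4 : calc_max_missing_py_alt (v :: vs) v = calc_max_missing_py_alt vs v := by
        rw [calc_max_missing_py_alt]; simp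
      rw [h4, alt_run vs v, max_eq_right hc]
    · simp only [calcLoopA, List.takeWhile_cons, List.dropWhile_cons, ne_eq, h,
        not_false_eq_true, decide_true, if_true, if_false, List.length_cons]
      simp only [ne_eq] at ih
      rw [ih (cur + 1) (by omega)]
      congr 1
      push_cast
      ring

-- ===== VERDICT (by name: the statement is the Claim_ definition above) =====
theorem calc_max_missing_py_spec : Claim_equal_calc_max_missing_py := by
  intro seq target _
  unfold Spec_calc_max_missing_py calc_max_missing_py
  have h := loopA_alt seq target 0 le_rfl
  simp only [maxPair, zero_add] at h
  rw [h, alt_run seq target]
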